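-- pv_equiv track=rewrite | github.com/qtli/AOT | utils/common.py | get_2d_list
-- ===== SOURCE A (Python) =====
-- def get_2d_list(lt):
--     sent_tok_2d =[]
--     tag = []
--     for w in lt:
--         if w == 'SOS':
--             sent_tok_2d.append(tag)
--             tag = []
--         else:
--             tag.append(w)
--     if tag != []:
--         sent_tok_2d.append(tag)
--     return sent_tok_2d
-- ===== SOURCE B (Python) =====
-- def get_2d_list(lt):
--     positions = [i for i, w in enumerate(lt) if w == 'SOS']
--     out = []
--     prev = 0
--     for p in positions:
--         out.append(lt[prev:p])
--         prev = p + 1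
--     trailing = lt[prev:]
--     if trailing != []:
--         out.append(trailing)
--     return out
-- ===== Notes on version B (the rewrite author's own statement) =====
-- stated objective: alternative
-- what changed: Replaces the single accumulate-a-buffer loop with a marker-index pre-pass followed by a slicing pass over the collected boundary positions.
import Mathlib
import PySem

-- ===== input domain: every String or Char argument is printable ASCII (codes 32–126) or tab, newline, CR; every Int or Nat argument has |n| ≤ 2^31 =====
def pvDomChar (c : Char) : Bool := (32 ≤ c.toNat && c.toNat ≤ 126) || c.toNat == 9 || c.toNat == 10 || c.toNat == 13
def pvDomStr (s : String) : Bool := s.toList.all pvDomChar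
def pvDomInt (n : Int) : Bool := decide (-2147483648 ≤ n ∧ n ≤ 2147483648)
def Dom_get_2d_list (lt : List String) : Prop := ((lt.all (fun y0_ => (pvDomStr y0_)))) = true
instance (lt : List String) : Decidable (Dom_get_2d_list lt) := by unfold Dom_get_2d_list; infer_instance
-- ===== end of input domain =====

-- B replaces A's accumulate-a-buffer loop by a marker-index pre-pass plus a slicing pass (alternative decomposition, same cost).

-- ===== PORT A =====
-- the for-loop of A, state = (sent_tok_2d, tag)
def aloop : List String → List (List String) → List String → (List (List String)) × List String
  | [], acc, tag => (acc, tag)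
  | w :: t, acc, tag =>
      if w == "SOS" then aloop t (acc ++ [tag]) [] else aloop t acc (tag ++ [w])

def get_2d_list (lt : List String) : List (List String) :=
  let r := aloop lt [] []
  if r.2 ≠ [] then r.1 ++ [r.2] else r.1

-- ===== PORT B =====
-- positions = [i for i, w in enumerate(lt) if w == 'SOS']
def positionsB (lt : List String) : List Int :=
  ((PySem.List.enumerate lt).filter (fun p => p.2 == "SOS")).map (fun p => p.1)

-- the for-loop of B over positions, state = (out, prev)
def bloop (lt : List String) : List Int → List (List String) → Int → (List (List String)) × Int
  | [], out, prev => (out, prev)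
  | p :: ps, out, prev =>
      bloop lt ps (out ++ [PySem.List.slice lt (some prev) (some p)]) (p + 1)

def get_2d_list_alt (lt : List String) : List (List String) :=
  let r := bloop lt (positionsB lt) [] 0
  let trailing := PySem.List.slice lt (some r.2) none
  if trailing ≠ [] then r.1 ++ [trailing] else r.1

-- ===== PRECONDITION & SPEC =====
def Spec_get_2d_list (lt : List String) (out : List (List String)) : Prop := out = get_2d_list_alt lt
instance (lt : List String) (out : List (List String)) : Decidable (Spec_get_2d_list lt out) := by unfold Spec_get_2d_list; infer_instance

-- ===== CLAIM (what is proved, stated in full; the proofs are below) =====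
def Claim_equal_get_2d_list : Prop := ∀ (lt : List String), Dom_get_2d_list lt → Spec_get_2d_list lt (get_2d_list lt)

-- ===== LEMMAS AND PROOFS =====

-- cons one word onto the head group (the shared cons-step of both programs)
def consHead (w : String) : List (List String) → List (List String)
  | [] => [[w]]
  | g :: gs => (w :: g) :: gs

-- ---- A-side lemmas ----

theorem aloop_acc (t : List String) : ∀ (acc : List (List String)) (tag : List String),
    aloop t acc tag = (acc ++ (aloop t [] tag).1, (aloop t [] tag).2) := by
  induction t with
  | nil => intro acc tag; simp [aloop]
  | cons w t ih =>
      intro acc tag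
      by_cases h : w = "SOS" <;> simp [aloop, h]
      · rw [ih (acc ++ [tag]) [], ih [tag] []]; simp
      · exact ih acc (tag ++ [w])

theorem aloop_cons_tag (x : String) (t : List String) : ∀ (tag : List String),
    aloop t [] (x :: tag) =
      match aloop t [] tag with
      | ([], tg) => ([], x :: tg)
      | (g :: gs, tg) => ((x :: g) :: gs, tg) := by
  induction t with
  | nil => intro tag; simp [aloop]
  | cons w t ih =>
      intro tag
      by_cases h : w = "SOS"
      · simp only [aloop, h, beq_self_eq_true, if_true, List.nil_append]
        rw [aloop_acc t [x :: tag] [], aloop_acc t [tag] []]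
        simp
      · simp only [aloop, beq_iff_eq, h, if_false]
        have e : (x :: tag) ++ [w] = x :: (tag ++ [w]) := rfl
        rw [e, ih (tag ++ [w])]

theorem A_sos (t : List String) : get_2d_list ("SOS" :: t) = [] :: get_2d_list t := by
  simp only [get_2d_list, aloop, beq_self_eq_true, if_true, List.nil_append]
  rw [aloop_acc t [[]] []]
  by_cases h : (aloop t [] []).2 = [] <;> simp [h]

theorem A_cons (w : String) (t : List String) (h : w ≠ "SOS") :
    get_2d_list (w :: t) = consHead w (get_2d_list t) := by
  simp only [get_2d_list, aloop, beq_iff_eq, h, if_false]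
  rw [show ([] : List String) ++ [w] = [w] from rfl, show [w] = w :: ([] : List String) from rfl,
      aloop_cons_tag w t []]
  rcases hr : aloop t [] [] with ⟨gs, tg⟩
  cases gs with
  | nil =>
      by_cases htg : tg = [] <;> simp [htg, consHead]
  | cons g gs' =>
      by_cases htg : tg = [] <;> simp [htg, consHead]

-- ---- B-side lemmas ----

theorem enumerate_shift {α : Type} (t : List α) : ∀ (s : Int),
    PySem.List.enumerate t (s + 1) = (PySem.List.enumerate t s).map (fun p => (p.1 + 1, p.2)) := by
  induction t with
  | nil => intro s; simp [PySem.List.enumerate_nil]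
  | cons x t ih =>
      intro s
      rw [PySem.List.enumerate_cons, PySem.List.enumerate_cons]
      simp only [List.map_cons]
      rw [show s + 1 + 1 = (s + 1) + 1 by ring, ih (s + 1)]

theorem positions_sos (t : List String) :
    positionsB ("SOS" :: t) = 0 :: (positionsB t).map (· + 1) := by
  simp only [positionsB, PySem.List.enumerate_cons]
  rw [show (0 : Int) + 1 = 0 + 1 by ring, enumerate_shift t 0]
  simp [List.filter_map, List.map_map, Function.comp_def]

theorem positions_cons (w : String) (t : List String) (h : w ≠ "SOS") :
    positionsB (w :: t) = (positionsB t).map (· + 1) := by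
  simp only [positionsB, PySem.List.enumerate_cons]
  rw [show (0 : Int) + 1 = 0 + 1 by ring, enumerate_shift t 0]
  simp [List.filter_map, List.map_map, Function.comp_def, h]

theorem positions_nonneg (lt : List String) : ∀ p ∈ positionsB lt, 0 ≤ p := by
  intro p hp
  simp only [positionsB, List.mem_map, List.mem_filter] at hp
  obtain ⟨q, ⟨hq, _⟩, rfl⟩ := hp
  rw [PySem.List.mem_enumerate_iff] at hq
  obtain ⟨k, hk, rfl⟩ := hq
  simp

theorem slice_cons_shift (x : String) (xs : List String) (a b : Int) (ha : 0 ≤ a) (hb : 0 ≤ b) :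
    PySem.List.slice (x :: xs) (some (a + 1)) (some (b + 1)) =
      PySem.List.slice xs (some a) (some b) := by
  rw [PySem.List.slice_toNat _ (by omega) (by omega), PySem.List.slice_toNat _ ha hb]
  have h1 : (a + 1).toNat = a.toNat + 1 := by omega
  have h2 : (b + 1).toNat = b.toNat + 1 := by omega
  rw [h1, h2]
  simp [List.drop_succ_cons]

theorem slice_from_cons_shift (x : String) (xs : List String) (a : Int) (ha : 0 ≤ a) :
    PySem.List.slice (x :: xs) (some (a + 1)) none = PySem.List.slice xs (some a) none := by
  rw [PySem.List.slice_from _ (by omega), PySem.List.slice_from _ ha]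
  have h1 : (a + 1).toNat = a.toNat + 1 := by omega
  rw [h1, List.drop_succ_cons]

theorem bloop_acc (lt : List String) (ps : List Int) : ∀ (out : List (List String)) (prev : Int),
    bloop lt ps out prev = (out ++ (bloop lt ps [] prev).1, (bloop lt ps [] prev).2) := by
  induction ps with
  | nil => intro out prev; simp [bloop]
  | cons p ps ih =>
      intro out prev
      simp only [bloop]
      rw [ih (out ++ [PySem.List.slice lt (some prev) (some p)]) (p + 1),
          ih ([] ++ [PySem.List.slice lt (some prev) (some p)]) (p + 1)]
      simp

theorem bloop_shift (x : String) (lt : List String) (ps : List Int) :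
    ∀ (prev : Int), (∀ p ∈ ps, 0 ≤ p) → 0 ≤ prev →
    bloop (x :: lt) (ps.map (· + 1)) [] (prev + 1) =
      ((bloop lt ps [] prev).1, (bloop lt ps [] prev).2 + 1) := by
  induction ps with
  | nil => intro prev _ _; simp [bloop]
  | cons p ps ih =>
      intro prev hps hprev
      simp only [List.map_cons, bloop]
      rw [bloop_acc (x :: lt) (ps.map (· + 1)), bloop_acc lt ps]
      rw [slice_cons_shift x lt prev p hprev (hps p (by simp))]
      rw [ih (p + 1) (fun q hq => hps q (by simp [hq])) (by have := hps p (by simp); omega)]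

theorem bloop_prev_nonneg (lt : List String) (ps : List Int) : ∀ (prev : Int),
    (∀ p ∈ ps, 0 ≤ p) → 0 ≤ prev → 0 ≤ (bloop lt ps [] prev).2 := by
  induction ps with
  | nil => intro prev _ h; simpa [bloop]
  | cons p ps ih =>
      intro prev hps hprev
      simp only [bloop]
      rw [bloop_acc lt ps]
      exact ih (p + 1) (fun q hq => hps q (by simp [hq])) (by have := hps p (by simp); omega)

theorem B_sos (t : List String) : get_2d_list_alt ("SOS" :: t) = [] :: get_2d_list_alt t := by
  simp only [get_2d_list_alt, positions_sos, bloop]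
  rw [bloop_acc ("SOS" :: t) ((positionsB t).map (· + 1))]
  rw [show (0 : Int) + 1 = 0 + 1 by ring,
      bloop_shift "SOS" t (positionsB t) 0 (positions_nonneg t) le_rfl]
  have hpr := bloop_prev_nonneg t (positionsB t) 0 (positions_nonneg t) le_rfl
  rw [show ((bloop t (positionsB t) [] 0).2 + 1) = (bloop t (positionsB t) [] 0).2 + 1 by ring,
      slice_from_cons_shift "SOS" t _ hpr]
  have hnil : PySem.List.slice ("SOS" :: t) (some 0) (some 0) = [] := by
    rw [PySem.List.slice_toNat _ le_rfl le_rfl]; simp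
  rw [hnil]
  by_cases h : PySem.List.slice t (some (bloop t (positionsB t) [] 0).2) none = [] <;> simp [h]

theorem B_cons (w : String) (t : List String) (h : w ≠ "SOS") :
    get_2d_list_alt (w :: t) = consHead w (get_2d_list_alt t) := by
  simp only [get_2d_list_alt, positions_cons w t h]
  rcases hps : positionsB t with _ | ⟨p, ps'⟩
  · simp only [List.map_nil, bloop]
    rw [PySem.List.slice_from _ le_rfl, PySem.List.slice_from _ le_rfl]
    cases t <;> simp [consHead]
  · have hmem : ∀ q ∈ positionsB t, 0 ≤ q := positions_nonneg t
    rw [hps] at hmem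
    have hp : 0 ≤ p := hmem p (by simp)
    simp only [List.map_cons, bloop]
    rw [bloop_acc (w :: t) (ps'.map (· + 1)), bloop_acc t ps']
    rw [show p + 1 + 1 = (p + 1) + 1 by ring,
        bloop_shift w t ps' (p + 1) (fun q hq => hmem q (by simp [hq])) (by omega)]
    have hpr : 0 ≤ (bloop t ps' [] (p + 1)).2 := by
      have : ∀ q ∈ ps', 0 ≤ q := fun q hq => hmem q (by simp [hq])
      exact bloop_prev_nonneg t ps' (p + 1) this (by omega)
    rw [slice_from_cons_shift w t _ hpr]
    have hhead : PySem.List.slice (w :: t) (some 0) (some (p + 1)) =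
        w :: PySem.List.slice t (some 0) (some p) := by
      rw [PySem.List.slice_toNat _ le_rfl (by omega), PySem.List.slice_toNat _ le_rfl hp]
      have : (p + 1).toNat = p.toNat + 1 := by omega
      simp [this]
    rw [hhead]
    by_cases htr : PySem.List.slice t (some (bloop t ps' [] (p + 1)).2) none = [] <;>
      simp [htr, consHead]

-- ===== VERDICT (by name: the statement is the Claim_ definition above) =====
theorem AB_eq (lt : List String) : get_2d_list lt = get_2d_list_alt lt := by
  induction lt with
  | nil => rfl
  | cons w t ih =>
      by_cases h : w = "SOS"
      · subst h; rw [A_sos, B_sos, ih]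
      · rw [A_cons w t h, B_cons w t h, ih]

theorem get_2d_list_spec : Claim_equal_get_2d_list := fun lt _ => AB_eq lt
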